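-- pv_equiv track=rewrite | github.com/miketraveller/bitesofpy | 29/save4_nopass.py | get_index_different_char
-- ===== SOURCE A (Python) =====
-- alphas = "abcdefghijklmnopqrstuvwxyzABCDEFGHIJKLMNOPQRSTUVWXYZ0123456789"
--
-- def get_index_different_char(chars):
--     count_alphas = 0
--     count_not_alphas = 0
--     for char in chars:
--         if str(char) in alphas:
--             count_alphas +=1
--         if str(char) not in alphas:
--             count_not_alphas += 1
--     if count_alphas < count_not_alphas:
--         key = [char for char in chars if str(char) in alphas][0]
--         return chars.index(key)
--     else:
--         key = [char for char in chars if str(char) not in alphas][0]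
--         return chars.index(key)
-- ===== SOURCE B (Python) =====
-- alphas = "abcdefghijklmnopqrstuvwxyzABCDEFGHIJKLMNOPQRSTUVWXYZ0123456789"
--
-- def get_index_different_char(chars):
--     alpha_idx = []
--     other_idx = []
--     for i, char in enumerate(chars):
--         (alpha_idx if str(char) in alphas else other_idx).append(i)
--     if len(alpha_idx) < len(other_idx):
--         return alpha_idx[0]
--     return other_idx[0]
-- ===== Notes on version B (the rewrite author's own statement) =====
-- stated objective: faster
-- what changed: B replaces A's three passes (a counting loop, a filter comprehension, and a list.index scan) by a single enumerate pass that partitions the indices into two lists and returns the head of the minority list.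
-- outside the precondition, e.g. on get_index_different_char([]): A raises IndexError, B raises IndexError
import Mathlib
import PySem

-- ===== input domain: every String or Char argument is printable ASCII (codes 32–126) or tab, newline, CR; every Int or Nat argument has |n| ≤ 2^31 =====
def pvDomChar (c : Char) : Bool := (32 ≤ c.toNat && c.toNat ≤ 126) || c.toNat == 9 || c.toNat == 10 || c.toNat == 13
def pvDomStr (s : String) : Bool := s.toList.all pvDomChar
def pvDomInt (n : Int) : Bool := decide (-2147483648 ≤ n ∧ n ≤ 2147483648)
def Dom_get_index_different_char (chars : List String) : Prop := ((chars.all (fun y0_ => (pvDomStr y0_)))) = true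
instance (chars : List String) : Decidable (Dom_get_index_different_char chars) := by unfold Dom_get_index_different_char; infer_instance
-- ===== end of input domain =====

-- B does the job in one indexed pass (two index lists) instead of A's count loop + filter + .index; same return value wherever A returns.

-- ===== PORT A =====
def pvAlphas : String := "abcdefghijklmnopqrstuvwxyzABCDEFGHIJKLMNOPQRSTUVWXYZ0123456789"

-- `str(char) in alphas` : Python substring membership (chars are already str, so str() is identity)
def pvInAlphas (c : String) : Bool := PySem.Str.isIn c pvAlphas

def get_index_different_char (chars : List String) : Int :=
  let counts := chars.foldl
    (fun (p : Int × Int) char =>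
      let p := if pvInAlphas char then (p.1 + 1, p.2) else p
      if !pvInAlphas char then (p.1, p.2 + 1) else p)
    (0, 0)
  if counts.1 < counts.2 then
    match PySem.List.pyGet? (chars.filter (fun c => pvInAlphas c)) 0 with
    | some key => ((PySem.List.index? chars key).getD 0 : Nat)
    | none => 0    -- Python raises IndexError here; excluded by Pre_
  else
    match PySem.List.pyGet? (chars.filter (fun c => !pvInAlphas c)) 0 with
    | some key => ((PySem.List.index? chars key).getD 0 : Nat)
    | none => 0    -- Python raises IndexError here; excluded by Pre_

-- ===== PORT B =====
def get_index_different_char_alt (chars : List String) : Int :=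
  let pr := (PySem.List.enumerate chars).foldl
    (fun (p : List Int × List Int) ic =>
      if pvInAlphas ic.2 then (p.1 ++ [ic.1], p.2) else (p.1, p.2 ++ [ic.1]))
    ([], [])
  if pr.1.length < pr.2.length then
    (PySem.List.pyGet? pr.1 0).getD 0    -- alpha_idx[0]; IndexError excluded by Pre_
  else
    (PySem.List.pyGet? pr.2 0).getD 0    -- other_idx[0]; IndexError excluded by Pre_

-- ===== PRECONDITION & SPEC =====
-- Pre_ excludes exactly the inputs where both A and B raise IndexError: the minority group
-- (alphas if strictly fewer alphas than non-alphas, else non-alphas) is empty — e.g. [] or an all-alpha list.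
def Pre_get_index_different_char (chars : List String) : Prop :=
  if chars.countP pvInAlphas < chars.countP (fun c => !pvInAlphas c) then
    chars.countP pvInAlphas ≠ 0
  else
    chars.countP (fun c => !pvInAlphas c) ≠ 0
instance (chars : List String) : Decidable (Pre_get_index_different_char chars) := by
  unfold Pre_get_index_different_char; infer_instance

def pvWitness_get_index_different_char : List String := ["a", "!", "b"]

def Spec_get_index_different_char (chars : List String) (out : Int) : Prop := out = get_index_different_char_alt chars
instance (chars : List String) (out : Int) : Decidable (Spec_get_index_different_char chars out) := by unfold Spec_get_index_different_char; infer_instance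

-- ===== CLAIM (what is proved, stated in full; the proofs are below) =====
def Claim_equal_get_index_different_char : Prop := ∀ (chars : List String), Dom_get_index_different_char chars → Pre_get_index_different_char chars → Spec_get_index_different_char chars (get_index_different_char chars)

-- ===== LEMMAS AND PROOFS =====

-- A's counting loop computes (countP q, countP !q).
theorem pv_countsA (q : String → Bool) (l : List String) (x y : Int) :
    l.foldl (fun (p : Int × Int) char =>
        let p := if q char then (p.1 + 1, p.2) else p
        if !q char then (p.1, p.2 + 1) else p) (x, y)
      = (x + (l.countP q : Int), y + (l.countP (fun c => !q c) : Int)) := by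
  induction l generalizing x y with
  | nil => simp
  | cons c t ih =>
      by_cases h : q c = true <;>
        simp only [List.foldl_cons, List.countP_cons, h, Bool.not_true, Bool.not_false,
          Bool.false_eq_true, if_true, if_false] <;>
        rw [ih] <;>
        simp [Prod.ext_iff] <;> ring

-- A's filter/[0]/index step returns the first index satisfying q.
theorem pv_selA (q : String → Bool) (l : List String) (h : l.countP q ≠ 0) :
    ∃ k, PySem.List.pyGet? (l.filter q) 0 = some k ∧ q k = true ∧
      PySem.List.index? l k = some (l.findIdx q) := by
  induction l with
  | nil => simp at h
  | cons c t ih =>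
      by_cases hc : q c = true
      · exact ⟨c, by simp [hc], hc,
          by rw [PySem.List.index?_cons_self]; simp [List.findIdx_cons, hc]⟩
      · have ht : t.countP q ≠ 0 := by simpa [List.countP_cons, hc] using h
        obtain ⟨k, h1, h2, h3⟩ := ih ht
        refine ⟨k, by simpa [List.filter_cons, hc] using h1, h2, ?_⟩
        have hne : c ≠ k := fun e => by rw [e] at hc; exact hc h2
        rw [PySem.List.index?_cons_of_ne t hne, h3]
        simp [List.findIdx_cons, hc]

-- the index list a partition pass produces, starting at index s
def pvIdxs (q : String → Bool) : List String → Int → List Int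
  | [], _ => []
  | c :: t, s => if q c then s :: pvIdxs q t (s + 1) else pvIdxs q t (s + 1)

theorem pv_foldB (q : String → Bool) (l : List String) (s : Int) (A B : List Int) :
    (PySem.List.enumerate l s).foldl
        (fun (p : List Int × List Int) ic =>
          if q ic.2 then (p.1 ++ [ic.1], p.2) else (p.1, p.2 ++ [ic.1])) (A, B)
      = (A ++ pvIdxs q l s, B ++ pvIdxs (fun c => !q c) l s) := by
  induction l generalizing s A B with
  | nil => simp [pvIdxs, PySem.List.enumerate_nil]
  | cons c t ih =>
      by_cases h : q c = true <;>
        simp [PySem.List.enumerate_cons, pvIdxs, h, ih]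

theorem pv_idxs_len (q : String → Bool) (l : List String) (s : Int) :
    (pvIdxs q l s).length = l.countP q := by
  induction l generalizing s with
  | nil => simp [pvIdxs]
  | cons c t ih =>
      by_cases h : q c = true <;> simp [pvIdxs, h, ih]

theorem pv_idxs_head (q : String → Bool) (l : List String) (s : Int) (h : l.countP q ≠ 0) :
    PySem.List.pyGet? (pvIdxs q l s) 0 = some (s + (l.findIdx q : Int)) := by
  induction l generalizing s with
  | nil => simp at h
  | cons c t ih =>
      by_cases hc : q c = true
      · simp [pvIdxs, hc, List.findIdx_cons]
      · have ht : t.countP q ≠ 0 := by simpa [List.countP_cons, hc] using h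
        rw [pvIdxs]
        simp only [hc, if_false, Bool.false_eq_true]
        rw [ih (s + 1) ht]
        simp [List.findIdx_cons, hc]
        ring

-- ===== VERDICT (by name: the statement is the Claim_ definition above) =====
theorem get_index_different_char_spec : Claim_equal_get_index_different_char := by
  intro chars _ hpre
  unfold Spec_get_index_different_char get_index_different_char get_index_different_char_alt
  rw [pv_countsA pvInAlphas chars 0 0, pv_foldB pvInAlphas chars 0 [] []]
  simp only [List.nil_append, zero_add]
  rw [pv_idxs_len, pv_idxs_len]
  unfold Pre_get_index_different_char at hpre
  by_cases hlt : chars.countP pvInAlphas < chars.countP (fun c => !pvInAlphas c)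
  · have ha : chars.countP pvInAlphas ≠ 0 := by simpa [hlt] using hpre
    obtain ⟨k, h1, _, h3⟩ := pv_selA pvInAlphas chars ha
    rw [if_pos (by exact_mod_cast hlt), if_pos hlt, h1,
        pv_idxs_head pvInAlphas chars 0 ha]
    rw [PySem.List.index?_eq_idxOf?] at h3
    simp [h3]
  · have hb : chars.countP (fun c => !pvInAlphas c) ≠ 0 := by simpa [hlt] using hpre
    obtain ⟨k, h1, _, h3⟩ := pv_selA (fun c => !pvInAlphas c) chars hb
    rw [if_neg (by exact_mod_cast hlt), if_neg hlt, h1,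
        pv_idxs_head (fun c => !pvInAlphas c) chars 0 hb]
    rw [PySem.List.index?_eq_idxOf?] at h3
    simp [h3]
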